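-- pv_equiv track=rewrite | github.com/oortur/document-scanner | detectors.py | ind_of_sign
-- ===== SOURCE A (Python) =====
-- import string
--
-- def ED(s, t):
--     """Edit/Levenshtein distance between words"""
--     s = ' ' + s
--     t = ' ' + t
--     D = [[0 for j in range(len(s))] for i in range(len(t))]
--     for i in range(len(s)):
--         D[0][i] = i
--     for i in range(len(t)):
--         D[i][0] = i
--     for i in range(1, len(t)):
--         for j in range(1, len(s)):
--             if t[i] == s[j]:
--                 D[i][j] = min(D[i - 1][j - 1], D[i - 1][j] + 1, D[i][j - 1] + 1)
--             else:
--                 D[i][j] = min(D[i - 1][j - 1] + 1, D[i - 1][j] + 1, D[i][j - 1] + 1)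
--     return D[-1][-1]
--
-- def ind_of_sign(words, target_words):
--     """Derive indices of words in document that are (close to) target words"""
--     target_lengths = [len(tw) for tw in target_words]
--     min_target_dist = sum(target_lengths) // (2 * len(target_words))
--     min_target_len, max_target_len = min(target_lengths), max(target_lengths)
--     indices = []
--     for index, s in enumerate(words):
--         s = str(s).lower()
--         s = s.translate(str.maketrans('', '', string.punctuation))
--         dist = min([ED(i, s) for i in target_words])
--         if dist < min_target_dist and min_target_len <= len(s) <= max_target_len:
--             indices.append(index)
--     return indices
-- ===== SOURCE B (Python) =====
-- import string
-- from functools import lru_cache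
--
-- def ED(s, t):
--     """Edit distance via top-down memoized recursion over prefix lengths."""
--     @lru_cache(maxsize=None)
--     def lev(i, j):
--         if i == 0:
--             return j
--         if j == 0:
--             return i
--         cost = 0 if t[i - 1] == s[j - 1] else 1
--         return min(lev(i - 1, j - 1) + cost, lev(i - 1, j) + 1, lev(i, j - 1) + 1)
--     return lev(len(t), len(s))
--
-- def _clean(w):
--     w = str(w).lower()
--     return w.translate(str.maketrans('', '', string.punctuation))
--
-- def ind_of_sign(words, target_words):
--     """Derive indices of words in document that are (close to) target words"""
--     lens = [len(tw) for tw in target_words]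
--     thresh = sum(lens) // (2 * len(target_words))
--     lo, hi = min(lens), max(lens)
--     return [idx for idx, w in enumerate(words)
--             if (lambda c: lo <= len(c) <= hi
--                 and min(ED(tw, c) for tw in target_words) < thresh)(_clean(w))]
-- ===== Notes on version B (the rewrite author's own statement) =====
-- stated objective: alternative
-- what changed: The edit distance is computed by a top-down memoized recursion on prefix lengths (lru_cache) instead of A's explicit bottom-up 2D matrix fill, and the index loop with appends is replaced by a list comprehension that checks the length bounds before computing distances.
import Mathlib
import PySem

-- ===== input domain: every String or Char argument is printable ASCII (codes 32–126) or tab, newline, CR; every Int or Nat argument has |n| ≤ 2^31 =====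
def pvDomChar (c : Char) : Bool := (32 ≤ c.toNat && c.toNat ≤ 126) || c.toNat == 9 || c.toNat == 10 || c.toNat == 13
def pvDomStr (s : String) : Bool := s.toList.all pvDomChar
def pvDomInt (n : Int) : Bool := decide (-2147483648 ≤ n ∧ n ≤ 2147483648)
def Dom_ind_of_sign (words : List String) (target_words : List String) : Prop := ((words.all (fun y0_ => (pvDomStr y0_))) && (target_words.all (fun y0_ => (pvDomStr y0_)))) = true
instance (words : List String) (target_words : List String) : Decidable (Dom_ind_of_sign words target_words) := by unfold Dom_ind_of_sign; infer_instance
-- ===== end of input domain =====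

-- B replaces A's bottom-up 2D Levenshtein matrix by a memoized top-down recursion on
-- prefix lengths and the index loop with appends by a comprehension (alternative decomposition).

-- ===== PORT A =====
-- string.punctuation
def pvPunct : List Char := "!\"#$%&'()*+,-./:;<=>?@[\\]^_`{|}~".toList

-- s.lower().translate(maketrans('', '', string.punctuation)), as the char list
def pvClean (w : String) : List Char :=
  ((PySem.Str.lower w).toList).filter (fun c => !(pvPunct.contains c))

-- inner loop 'for j in range(1, len(s))' of A's ED: walks the remaining columns,
-- carrying cur[j-1] (left) and the suffix of the previous row starting at j-1
def edRowAux (ti : Char) : Nat → List Char → List Nat → List Nat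
  | left, c :: cs, p0 :: p1 :: ps =>
      let v := if ti = c then min p0 (min (p1 + 1) (left + 1))
               else min (p0 + 1) (min (p1 + 1) (left + 1))
      v :: edRowAux ti v cs (p1 :: ps)
  | _, _, _ => []

-- outer loop 'for i in range(1, len(t))': builds row i from row i-1 (D[i][0] = i)
def edRows (s : List Char) : List Char → List Nat → Nat → List Nat
  | [], prev, _ => prev
  | c :: cs, prev, i => edRows s cs (i :: edRowAux c i s prev) (i + 1)

-- A's ED: row 0 is [0..len(s)], then the nested fill; result D[-1][-1]
def pvED (s t : List Char) : Nat :=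
  (edRows s t (List.range (s.length + 1)) 1).getLastD 0

def ind_of_sign (words : List String) (target_words : List String) : List Int :=
  let target_lengths : List Int := target_words.map PySem.Str.len
  let min_target_dist := PySem.Int.floordiv target_lengths.sum (2 * target_words.length)
  match PySem.List.min? target_lengths (fun x => x), PySem.List.max? target_lengths (fun x => x) with
  | some mn, some mx =>
      (PySem.List.enumerate words).foldl (fun indices p =>
        let s := pvClean p.2
        match PySem.List.min? (target_words.map (fun tw => (pvED tw.toList s : Int))) (fun x => x) with
        | some dist =>
            if dist < min_target_dist ∧ mn ≤ (s.length : Int) ∧ (s.length : Int) ≤ mx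
            then indices ++ [p.1] else indices
        | none => indices) []
  | _, _ => []

-- ===== PORT B =====
-- B-side copies of string.punctuation and the lower+translate cleaning (same python code as A's)
def pvPunctB : List Char := "!\"#$%&'()*+,-./:;<=>?@[\\]^_`{|}~".toList
def pvCleanB (w : String) : List Char :=
  ((PySem.Str.lower w).toList).filter (fun c => !(pvPunctB.contains c))
-- B's memoized lev(i, j): edit distance of the first i chars of t and first j of s
def pvLev (t s : List Char) : Nat → Nat → Nat
  | 0, j => j
  | i + 1, 0 => i + 1
  | i + 1, j + 1 =>
      let cost := if t.getD i ' ' = s.getD j ' ' then 0 else 1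
      min (pvLev t s i j + cost) (min (pvLev t s i (j + 1) + 1) (pvLev t s (i + 1) j + 1))
  termination_by i j => (i, j)

def pvEDalt (s t : List Char) : Nat := pvLev t s t.length s.length

def ind_of_sign_alt (words : List String) (target_words : List String) : List Int :=
  let lens : List Int := target_words.map PySem.Str.len
  let thresh := PySem.Int.floordiv lens.sum (2 * target_words.length)
  match PySem.List.min? lens (fun x => x) with
  | none => []
  | some lo =>
    match PySem.List.max? lens (fun x => x) with
    | none => []
    | some hi =>
        (PySem.List.enumerate words).filterMap (fun p =>
          let c := pvCleanB p.2
          if lo ≤ (c.length : Int) ∧ (c.length : Int) ≤ hi then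
            match PySem.List.min? (target_words.map (fun tw => (pvEDalt tw.toList c : Int))) (fun x => x) with
            | none => none
            | some d => if d < thresh then some p.1 else none
          else none)

-- ===== PRECONDITION & SPEC =====
-- A raises ZeroDivisionError (and min()/max() of an empty list) when target_words = []
def Pre_ind_of_sign (words : List String) (target_words : List String) : Prop := target_words ≠ []
instance (words : List String) (target_words : List String) : Decidable (Pre_ind_of_sign words target_words) := by unfold Pre_ind_of_sign; infer_instance
def pvWitness_ind_of_sign : List String × List String := (["Hello,", "sig", "xx"], ["sign", "sig."])

def Spec_ind_of_sign (words : List String) (target_words : List String) (out : List Int) : Prop := out = ind_of_sign_alt words target_words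
instance (words : List String) (target_words : List String) (out : List Int) : Decidable (Spec_ind_of_sign words target_words out) := by unfold Spec_ind_of_sign; infer_instance

-- ===== CLAIM (what is proved, stated in full; the proofs are below) =====
def Claim_equal_ind_of_sign : Prop := ∀ (words : List String) (target_words : List String), Dom_ind_of_sign words target_words → Pre_ind_of_sign words target_words → Spec_ind_of_sign words target_words (ind_of_sign words target_words)

-- ===== LEMMAS AND PROOFS =====

theorem pvLev_succ_succ (t s : List Char) (i j : Nat) :
    pvLev t s (i + 1) (j + 1)
    = min (pvLev t s i j + (if t.getD i ' ' = s.getD j ' ' then 0 else 1))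
        (min (pvLev t s i (j + 1) + 1) (pvLev t s (i + 1) j + 1)) := by
  rw [pvLev]

theorem edRowAux_spec (t s : List Char) (i : Nat) :
    ∀ (cs : List Char) (j0 : Nat), cs = s.drop j0 →
      edRowAux (t.getD i ' ') (pvLev t s (i + 1) j0) cs
        ((List.range (cs.length + 1)).map (fun k => pvLev t s i (j0 + k)))
      = (List.range cs.length).map (fun k => pvLev t s (i + 1) (j0 + 1 + k)) := by
  intro cs
  induction cs with
  | nil => intro j0 h; simp [edRowAux]
  | cons c cs' ih =>
      intro j0 h
      have hc : s.getD j0 ' ' = c := by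
        have : (s.drop j0).getD 0 ' ' = c := by rw [← h]; rfl
        simpa [List.getD, List.getElem?_drop] using this
      have hdrop : cs' = s.drop (j0 + 1) := by
        have := congrArg (List.drop 1) h
        simpa [List.drop_drop, Nat.add_comm] using this
      rw [List.length_cons, List.range_succ_eq_map, List.range_succ_eq_map]
      simp only [List.map_cons, List.map_map]
      rw [edRowAux]
      have hv : (if t.getD i ' ' = c then
            min (pvLev t s i (j0 + 0)) (min (pvLev t s i (j0 + Nat.succ 0) + 1) (pvLev t s (i + 1) j0 + 1))
          else
            min (pvLev t s i (j0 + 0) + 1) (min (pvLev t s i (j0 + Nat.succ 0) + 1) (pvLev t s (i + 1) j0 + 1)))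
          = pvLev t s (i + 1) (j0 + 1) := by
        rw [pvLev_succ_succ, hc]
        simp only [Nat.add_zero, Nat.succ_eq_add_one, Nat.zero_add]
        split_ifs with hm <;> omega
      rw [hv]
      have htail := ih (j0 + 1) hdrop
      rw [List.range_succ_eq_map] at htail
      simp only [List.map_cons, List.map_map] at htail
      simp only [Function.comp_def, Nat.succ_eq_add_one, Nat.add_zero] at htail ⊢
      simp only [Nat.add_comm, Nat.add_left_comm] at htail ⊢
      rw [htail]

theorem pvLev_zero_right (t s : List Char) (i : Nat) : pvLev t s i 0 = i := by
  cases i <;> simp [pvLev]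

theorem edRows_spec (t s : List Char) :
    ∀ (cs : List Char) (k : Nat), cs = t.drop k → k ≤ t.length →
      edRows s cs ((List.range (s.length + 1)).map (fun j => pvLev t s k j)) (k + 1)
      = (List.range (s.length + 1)).map (fun j => pvLev t s t.length j) := by
  intro cs
  induction cs with
  | nil =>
      intro k h hk
      have : k = t.length := by
        have := (List.drop_eq_nil_iff).mp h.symm
        omega
      subst this
      rfl
  | cons c cs' ih =>
      intro k h hk
      have hklt : k < t.length := by
        by_contra hge
        have : t.drop k = [] := List.drop_eq_nil_iff.mpr (by omega)
        rw [this] at h; exact (List.cons_ne_nil _ _) h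
      have hc : t.getD k ' ' = c := by
        have : (t.drop k).getD 0 ' ' = c := by rw [← h]; rfl
        simpa [List.getD, List.getElem?_drop] using this
      have hdrop : cs' = t.drop (k + 1) := by
        have := congrArg (List.drop 1) h
        simpa [List.drop_drop, Nat.add_comm] using this
      rw [edRows]
      have hrow : (k + 1) :: edRowAux c (k + 1) s
            ((List.range (s.length + 1)).map (fun j => pvLev t s k j))
          = (List.range (s.length + 1)).map (fun j => pvLev t s (k + 1) j) := by
        have haux := edRowAux_spec t s k s 0 (by simp)
        rw [pvLev_zero_right] at haux
        simp only [Nat.zero_add] at haux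
        rw [← hc, haux]
        rw [List.range_succ_eq_map, List.map_cons, List.map_map]
        congr 1
        · exact (pvLev_zero_right t s (k+1)).symm
        · congr 1
          funext j
          simp [Function.comp, Nat.add_comm, Nat.succ_eq_add_one]
      rw [hrow]
      exact ih (k + 1) hdrop (by omega)

theorem getLastD_range_map (f : Nat → Nat) (n : Nat) :
    ((List.range (n + 1)).map f).getLastD 0 = f n := by
  rw [List.range_succ, List.map_append]
  simp

theorem pvED_eq (s t : List Char) : pvED s t = pvEDalt s t := by
  have h0 : (List.range (s.length + 1)).map (fun j => pvLev t s 0 j) = List.range (s.length + 1) := by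
    simp [pvLev]
  have := edRows_spec t s t 0 (by simp) (by omega)
  rw [h0] at this
  rw [pvED, this, getLastD_range_map]
  rfl

theorem foldl_filterMap {α : Type} (g : α → Option Int) :
    ∀ (l : List α) (acc : List Int),
      l.foldl (fun indices p => match g p with | some v => indices ++ [v] | none => indices) acc
      = acc ++ l.filterMap g := by
  intro l
  induction l with
  | nil => intro acc; simp
  | cons x xs ih =>
      intro acc
      cases hg : g x <;> simp [List.foldl, hg, ih]

theorem pvCleanB_eq (w : String) : pvCleanB w = pvClean w := rfl

theorem main_eq (words target_words : List String) :
    ind_of_sign words target_words = ind_of_sign_alt words target_words := by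
  unfold ind_of_sign ind_of_sign_alt
  simp only [pvCleanB_eq]
  cases hmn : PySem.List.min? (target_words.map PySem.Str.len) (fun x => x) with
  | none =>
      have hmx : PySem.List.max? (target_words.map PySem.Str.len) (fun x => x) = none := by
        rw [PySem.List.max?_eq_none_iff]
        exact (PySem.List.min?_eq_none_iff _ _).mp hmn
      simp
  | some mn =>
      cases hmx : PySem.List.max? (target_words.map PySem.Str.len) (fun x => x) with
      | none =>
          exfalso
          have h1 := (PySem.List.max?_eq_none_iff _ _).mp hmx
          rw [h1] at hmn
          simp [PySem.List.min?] at hmn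
      | some mx =>
          simp only [pvED_eq]
          have hbody : (fun (indices : List Int) (p : Int × String) =>
              match PySem.List.min? (target_words.map (fun tw => (pvEDalt tw.toList (pvClean p.2) : Int))) (fun x => x) with
              | some dist => if dist < PySem.Int.floordiv (target_words.map PySem.Str.len).sum (2 * target_words.length) ∧ mn ≤ ((pvClean p.2).length : Int) ∧ ((pvClean p.2).length : Int) ≤ mx then indices ++ [p.1] else indices
              | none => indices)
            = (fun indices p => match (fun q : Int × String =>
                match PySem.List.min? (target_words.map (fun tw => (pvEDalt tw.toList (pvClean q.2) : Int))) (fun x => x) with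
                | some dist => if dist < PySem.Int.floordiv (target_words.map PySem.Str.len).sum (2 * target_words.length) ∧ mn ≤ ((pvClean q.2).length : Int) ∧ ((pvClean q.2).length : Int) ≤ mx then some q.1 else none
                | none => none) p with
              | some v => indices ++ [v] | none => indices) := by
            funext indices p
            cases h : PySem.List.min? (target_words.map (fun tw => (pvEDalt tw.toList (pvClean p.2) : Int))) (fun x => x) with
            | none => simp only [h]
            | some dist => simp only [h]; split_ifs <;> rfl
          rw [hbody, foldl_filterMap, List.nil_append]
          congr 1
          funext q
          cases h : PySem.List.min? (target_words.map (fun tw => (pvEDalt tw.toList (pvClean q.2) : Int))) (fun x => x) with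
          | none => split_ifs <;> rfl
          | some dist => simp only [h]; split_ifs <;> first | rfl | tauto

-- ===== VERDICT (by name: the statement is the Claim_ definition above) =====
theorem ind_of_sign_spec : Claim_equal_ind_of_sign := by
  intro words target_words _ _
  unfold Spec_ind_of_sign
  exact main_eq words target_words
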